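-- pv_equiv track=rewrite | github.com/laf12/thesis-bias-extension | utils/get_shear_scale.py | process_ocr_text
-- ===== SOURCE A (Python) =====
-- def process_ocr_text(ocr_text):
--     elements = []
--     current_element = ""
--
--     for char in ocr_text:
--         if char == '\n':
--             if current_element:
--                 elements.append(current_element)
--             current_element = ""
--         else:
--             current_element += char
--
--     if current_element:
--         elements.append(current_element)
--
--     return elements
-- ===== SOURCE B (Python) =====
-- def process_ocr_text(ocr_text):
--     return [line for line in ocr_text.split('\n') if line]
-- ===== Notes on version B (the rewrite author's own statement) =====
-- stated objective: idiomatic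
-- what changed: Replaces the manual per-character accumulator loop with a single library str.split on the newline separator followed by a comprehension dropping empty lines; no running buffer or post-loop flush, and the C-level split makes it measurably faster.
import Mathlib
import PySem

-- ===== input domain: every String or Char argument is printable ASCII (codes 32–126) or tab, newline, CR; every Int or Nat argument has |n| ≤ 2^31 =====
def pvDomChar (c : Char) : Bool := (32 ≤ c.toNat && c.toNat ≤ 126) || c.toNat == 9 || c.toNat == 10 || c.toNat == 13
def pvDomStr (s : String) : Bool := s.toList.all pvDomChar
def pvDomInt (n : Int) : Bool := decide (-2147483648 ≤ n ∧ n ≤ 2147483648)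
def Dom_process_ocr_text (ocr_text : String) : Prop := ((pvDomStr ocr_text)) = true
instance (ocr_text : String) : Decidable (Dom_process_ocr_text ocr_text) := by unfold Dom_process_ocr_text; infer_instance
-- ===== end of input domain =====

-- B replaces A's per-character accumulator loop with a library split on '\n' plus a filter dropping empty lines (idiomatic; same cost).

-- ===== PORT A =====
-- the loop body: on '\n' flush the non-empty current element, otherwise extend it
def pvStepA (st : List String × String) (ch : Char) : List String × String :=
  if ch = '\n' then (if st.2 ≠ "" then st.1 ++ [st.2] else st.1, "")
  else (st.1, st.2.push ch)

def process_ocr_text (ocr_text : String) : List String :=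
  let p := ocr_text.toList.foldl pvStepA ([], "")
  if p.2 ≠ "" then p.1 ++ [p.2] else p.1

-- ===== PORT B =====
def process_ocr_text_alt (ocr_text : String) : List String :=
  ((PySem.Str.split? ocr_text "\n").getD []).filter (fun line => line ≠ "")

-- ===== PRECONDITION & SPEC =====
def Spec_process_ocr_text (ocr_text : String) (out : List String) : Prop := out = process_ocr_text_alt ocr_text
instance (ocr_text : String) (out : List String) : Decidable (Spec_process_ocr_text ocr_text out) := by unfold Spec_process_ocr_text; infer_instance

-- ===== CLAIM (what is proved, stated in full; the proofs are below) =====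
def Claim_equal_process_ocr_text : Prop := ∀ (ocr_text : String), Dom_process_ocr_text ocr_text → Spec_process_ocr_text ocr_text (process_ocr_text ocr_text)

-- ===== LEMMAS AND PROOFS =====

-- a direct recursive characterisation of splitting a char list on a single character
def pvSpl (c : Char) (pre : List Char) : List Char → List (List Char)
  | [] => [pre]
  | x :: rest => if x = c then pre :: pvSpl c [] rest else pvSpl c (pre ++ [x]) rest

theorem pvGo_eq (c : Char) : ∀ (fuel : Nat) (l : List Char), l.length ≤ fuel →
    ∀ (cur : List Char) (acc : List (List Char)),
    PySem.Chars.splitOn.go [c] fuel l cur acc = acc.reverse ++ pvSpl c cur.reverse l := by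
  intro fuel
  induction fuel with
  | zero =>
    intro l hl cur acc
    have : l = [] := List.eq_nil_of_length_eq_zero (Nat.le_zero.mp hl)
    subst this
    simp [PySem.Chars.splitOn.go, pvSpl]
  | succ n ih =>
    intro l hl cur acc
    cases l with
    | nil => simp [PySem.Chars.splitOn.go, pvSpl]
    | cons x rest =>
      by_cases hx : x = c
      · subst hx
        rw [show PySem.Chars.splitOn.go [x] (n+1) (x :: rest) cur acc
              = PySem.Chars.splitOn.go [x] n (List.drop 1 (x :: rest)) [] (cur.reverse :: acc) by
            simp [PySem.Chars.splitOn.go, List.isPrefixOf]]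
        rw [ih _ (by simpa using Nat.le_of_succ_le_succ hl)]
        simp [pvSpl]
      · rw [show PySem.Chars.splitOn.go [c] (n+1) (x :: rest) cur acc
              = PySem.Chars.splitOn.go [c] n rest (x :: cur) acc by
            simp [PySem.Chars.splitOn.go, List.isPrefixOf]
            intro h; exact absurd h.symm hx]
        rw [ih _ (by simpa using Nat.le_of_succ_le_succ hl)]
        simp [pvSpl, hx]

theorem pvSplitOn_eq (c : Char) (cs : List Char) :
    PySem.Chars.splitOn cs [c] = pvSpl c [] cs := by
  rw [PySem.Chars.splitOn, pvGo_eq c _ _ (Nat.le_succ _)]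
  simp

-- A's fold, flushed at the end, is the filtered split
theorem pvFold_eq (cs : List Char) : ∀ (els : List String) (cur : String),
    (let p := cs.foldl pvStepA (els, cur); if p.2 ≠ "" then p.1 ++ [p.2] else p.1)
    = els ++ ((pvSpl '\n' cur.toList cs).map String.ofList).filter (fun line => line ≠ "") := by
  induction cs with
  | nil =>
    intro els cur
    by_cases h : cur = ""
    · subst h; simp [pvSpl]
    · have : cur.toList ≠ [] := by
        intro hh; exact h (by
          have := congrArg String.ofList hh
          simpa using this)
      simp [pvSpl, h, String.ofList]
  | cons x rest ih =>
    intro els cur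
    by_cases hx : x = '\n'
    · subst hx
      show (let p := rest.foldl pvStepA (pvStepA (els, cur) '\n'); if p.2 ≠ "" then p.1 ++ [p.2] else p.1) = _
      rw [show pvStepA (els, cur) '\n' = (if cur ≠ "" then els ++ [cur] else els, "") by rfl]
      rw [ih]
      by_cases h : cur = ""
      · subst h; simp [pvSpl]
      · have hl : cur.toList ≠ [] := by
          intro hh; exact h (by
            have := congrArg String.ofList hh
            simpa using this)
        simp [pvSpl, h, String.ofList]
    · show (let p := rest.foldl pvStepA (pvStepA (els, cur) x); if p.2 ≠ "" then p.1 ++ [p.2] else p.1) = _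
      rw [show pvStepA (els, cur) x = (els, cur.push x) by simp [pvStepA, hx]]
      rw [ih]
      simp [pvSpl, hx, String.toList_push]

-- ===== VERDICT (by name: the statement is the Claim_ definition above) =====
theorem process_ocr_text_spec : Claim_equal_process_ocr_text := by
  intro s _
  show process_ocr_text s = process_ocr_text_alt s
  unfold process_ocr_text process_ocr_text_alt
  rw [pvFold_eq]
  simp [PySem.Str.split?, PySem.Chars.split?, pvSplitOn_eq]
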